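-- pv_equiv track=rewrite | github.com/victor0198utm/LFPC | LAB 3/FAF191, Caragiu Victor, Lab_3_ex25.py | remove_char
-- ===== SOURCE A (Python) =====
-- def remove_char(word, character, start):
-- 	resulted_word = ""
-- 	count = 0
-- 	remove = True
-- 	for letter in word:
-- 		if letter == character:
-- 			if remove and count >= start:
-- 				remove = False
-- 				continue
-- 			count += 1
-- 		resulted_word += letter
--
-- 	return resulted_word
-- ===== SOURCE B (Python) =====
-- def remove_char(word, character, start):
--     count = 0
--     for i, letter in enumerate(word):
--         if letter == character:
--             if count >= start:
--                 return word[:i] + word[i+1:]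
--             count += 1
--     return word
-- ===== Notes on version B (the rewrite author's own statement) =====
-- stated objective: simpler
-- what changed: B locates the index of the occurrence to drop in one pass and returns word[:i]+word[i+1:], returning word unchanged otherwise, eliminating A's accumulator string and the 'remove' flag.
import Mathlib
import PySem

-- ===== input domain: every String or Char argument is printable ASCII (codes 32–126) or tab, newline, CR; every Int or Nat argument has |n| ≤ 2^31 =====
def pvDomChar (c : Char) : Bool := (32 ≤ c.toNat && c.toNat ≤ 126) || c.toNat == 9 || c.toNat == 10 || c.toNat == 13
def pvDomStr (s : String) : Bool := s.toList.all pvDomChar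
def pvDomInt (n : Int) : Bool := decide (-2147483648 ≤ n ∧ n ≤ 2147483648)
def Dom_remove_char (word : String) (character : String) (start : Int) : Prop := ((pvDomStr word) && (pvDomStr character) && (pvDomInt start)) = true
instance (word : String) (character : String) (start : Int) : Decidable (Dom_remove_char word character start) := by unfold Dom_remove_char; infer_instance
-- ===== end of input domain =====

-- B returns word[:i] + word[i+1:] for the single located index instead of A's
-- character-by-character accumulator with a 'remove' flag: simpler decomposition, same values.

-- ===== PORT A =====
-- loop body of A's for-loop; state = (resulted_word, count, remove)
def removeCharStepA (character : String) (start : Int)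
    (st : List Char × Int × Bool) (letter : Char) : List Char × Int × Bool :=
  if String.mk [letter] = character then
    if st.2.2 ∧ st.2.1 ≥ start then (st.1, st.2.1, false)
    else (st.1 ++ [letter], st.2.1 + 1, st.2.2)
  else (st.1 ++ [letter], st.2.1, st.2.2)

def remove_char (word : String) (character : String) (start : Int) : String :=
  let st := word.toList.foldl (removeCharStepA character start) ([], 0, true)
  String.mk st.1

-- ===== PORT B =====
-- B's enumerate loop: returns the index of the first matching letter whose count
-- has reached start, or none if the loop finishes.
def removeCharFind (cs : List Char) (character : String) (start : Int)
    (count : Int) (i : Nat) : Option Nat :=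
  match cs with
  | [] => none
  | c :: cs =>
    if String.mk [c] = character then
      if count ≥ start then some i
      else removeCharFind cs character start (count + 1) (i + 1)
    else removeCharFind cs character start count (i + 1)

def remove_char_alt (word : String) (character : String) (start : Int) : String :=
  match removeCharFind word.toList character start 0 0 with
  | none => word
  | some i => String.mk (word.toList.take i ++ word.toList.drop (i + 1))  -- word[:i] + word[i+1:], i in range

-- ===== PRECONDITION & SPEC =====
def Spec_remove_char (word : String) (character : String) (start : Int) (out : String) : Prop := out = remove_char_alt word character start
instance (word : String) (character : String) (start : Int) (out : String) : Decidable (Spec_remove_char word character start out) := by unfold Spec_remove_char; infer_instance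

-- ===== CLAIM (what is proved, stated in full; the proofs are below) =====
def Claim_equal_remove_char : Prop := ∀ (word : String) (character : String) (start : Int), Dom_remove_char word character start → Spec_remove_char word character start (remove_char word character start)

-- ===== LEMMAS AND PROOFS =====

-- once remove = false, the rest of the word is appended verbatim
theorem foldA_false (character : String) (start : Int) :
    ∀ (cs : List Char) (acc : List Char) (count : Int),
      (cs.foldl (removeCharStepA character start) (acc, count, false)).1 = acc ++ cs := by
  intro cs
  induction cs with
  | nil => intro acc count; simp [List.foldl]
  | cons c cs ih =>
    intro acc count
    simp only [List.foldl, removeCharStepA]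
    by_cases h : String.mk [c] = character
    · simp [h, ih]
    · simp [h, ih]

-- shifting the enumerate index
theorem removeCharFind_shift (character : String) (start : Int) :
    ∀ (cs : List Char) (count : Int) (i : Nat),
      removeCharFind cs character start count (i + 1)
        = (removeCharFind cs character start count i).map (· + 1) := by
  intro cs
  induction cs with
  | nil => intro count i; simp [removeCharFind]
  | cons c cs ih =>
    intro count i
    simp only [removeCharFind]
    by_cases h : String.mk [c] = character
    · by_cases h2 : count ≥ start
      · simp [h, h2]
      · simp [h, h2, ih]
    · simp [h, ih]

-- main invariant: A's fold from (acc, count, true) against B's index search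
theorem foldA_true (character : String) (start : Int) :
    ∀ (cs : List Char) (acc : List Char) (count : Int),
      (cs.foldl (removeCharStepA character start) (acc, count, true)).1
        = match removeCharFind cs character start count 0 with
          | none => acc ++ cs
          | some i => acc ++ (cs.take i ++ cs.drop (i + 1)) := by
  intro cs
  induction cs with
  | nil => intro acc count; simp [List.foldl, removeCharFind]
  | cons c cs ih =>
    intro acc count
    simp only [List.foldl, removeCharStepA, removeCharFind]
    by_cases h : String.mk [c] = character
    · by_cases h2 : count ≥ start
      · simp only [h, h2, and_true, if_pos trivial]
        simp [foldA_false]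
      · simp only [h, h2, if_true, and_false]
        rw [show (0 : Nat) + 1 = 0 + 1 from rfl] at *
        
        have := ih (acc ++ [c]) (count + 1)
        
        rw [removeCharFind_shift]
        cases hf : removeCharFind cs character start (count + 1) 0 with
        | none => simpa [hf] using this
        | some i =>
          simp only [hf, Option.map_some] at this ⊢
          simp [this, List.take_succ_cons, List.drop_succ_cons]
    · have := ih (acc ++ [c]) count
      simp only [if_neg h]
      rw [removeCharFind_shift]
      cases hf : removeCharFind cs character start count 0 with
      | none => simpa [hf] using this
      | some i =>
        simp only [hf, Option.map_some] at this ⊢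
        simp [this, List.take_succ_cons, List.drop_succ_cons]

-- ===== VERDICT (by name: the statement is the Claim_ definition above) =====
theorem remove_char_spec : Claim_equal_remove_char := by
  intro word character start _
  unfold Spec_remove_char remove_char remove_char_alt
  show String.mk ((word.toList.foldl (removeCharStepA character start) ([], 0, true)).1) = _
  rw [foldA_true]
  cases hf : removeCharFind word.toList character start 0 0 with
  | none => simp [String.mk]
  | some i => simp
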